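-- pv_equiv track=rewrite | github.com/LiamBrem/Beadit | video_stitching.py | get_sorted_video_files
-- ===== SOURCE A (Python) =====
-- def get_sorted_video_files(video_files):
--     """Sort video files by number in the filename (assuming IMG_xxx format)."""
--     valid_videos = []
--
--     for file_name in video_files:
--         try:
--             # Only include files that match the "IMG_xxx" pattern
--             if file_name.startswith("IMG_"):
--                 # Extract the number and append the valid video file to the list
--                 int(file_name.split("IMG_")[-1].split('.')[0])
--                 valid_videos.append(file_name)
--         except (IndexError, ValueError):
--             # Skip files that don't match the format
--             continue
--
--     return sorted(valid_videos, key=lambda x: int(x.split("IMG_")[-1].split('.')[0]))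
-- ===== SOURCE B (Python) =====
-- def get_sorted_video_files(video_files):
--     """Sort video files by number in the filename (assuming IMG_xxx format).
--
--     Online stable insertion sort over two parallel lists (keys and names):
--     each valid name is placed directly at its sorted position as it is seen,
--     so no separate filtering pass and no final sort call are needed.
--     """
--     nums = []
--     names = []
--     for name in video_files:
--         if name.startswith("IMG_"):
--             try:
--                 num = int(name.split("IMG_")[-1].split('.')[0])
--             except ValueError:
--                 continue
--             i = 0
--             while i < len(nums) and nums[i] <= num:
--                 i += 1
--             nums.insert(i, num)
--             names.insert(i, name)
--     return names
-- ===== Notes on version B (the rewrite author's own statement) =====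
-- stated objective: alternative
-- what changed: Replaces A's filter-then-library-sort (collect valid names, then sorted() with a re-parsing key) with an online stable insertion sort over two parallel lists: each valid name is parsed once and immediately inserted at its sorted position, so there is no separate filtering pass and no sort call at all.
import Mathlib
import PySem

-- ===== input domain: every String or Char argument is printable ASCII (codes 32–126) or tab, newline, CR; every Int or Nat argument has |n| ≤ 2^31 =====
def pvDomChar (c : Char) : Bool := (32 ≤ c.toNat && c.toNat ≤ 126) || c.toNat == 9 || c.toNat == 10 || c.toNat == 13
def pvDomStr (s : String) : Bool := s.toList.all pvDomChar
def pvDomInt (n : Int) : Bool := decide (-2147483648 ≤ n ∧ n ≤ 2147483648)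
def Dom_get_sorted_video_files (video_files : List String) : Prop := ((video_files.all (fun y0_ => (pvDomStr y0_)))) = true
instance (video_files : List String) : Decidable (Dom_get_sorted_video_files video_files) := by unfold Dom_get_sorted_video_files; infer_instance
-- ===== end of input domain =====

-- B replaces A's filter-then-library-sort with an online stable insertion sort over two
-- parallel lists (keys and names), parsing each name once; same result, no sort call.

-- ===== PORT A =====
-- int(x.split("IMG_")[-1].split('.')[0]) : none = ValueError.  'IMG_' and '.' are nonempty, so
-- split? is some and nonempty and [-1]/[0] never raise IndexError; getD []/getLastD ""/headD "" are exact.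
def aParse (x : String) : Option Int :=
  PySem.Int.ofStr? ((((PySem.Str.split? (((PySem.Str.split? x "IMG_").getD []).getLastD "") ".").getD []).headD ""))

def get_sorted_video_files (video_files : List String) : List String :=
  let valid_videos := video_files.foldl (fun acc file_name =>
    if PySem.Str.startswith file_name "IMG_" then
      match aParse file_name with          -- int(...) raising ValueError → skip (the except branch)
      | some _ => acc ++ [file_name]
      | none => acc
    else acc) []
  -- the sorted key int(...) always succeeds on members of valid_videos; getD 0 is never the default
  PySem.List.sorted valid_videos (fun x => (aParse x).getD 0) false

-- ===== PORT B =====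
-- the same parse expression as in Source B's try block (none = ValueError → continue)
def bParse (name : String) : Option Int :=
  PySem.Int.ofStr? ((((PySem.Str.split? (((PySem.Str.split? name "IMG_").getD []).getLastD "") ".").getD []).headD ""))

-- the while loop: i = 0; while i < len(nums) and nums[i] <= num: i += 1
def bFindIdx (num : Int) (nums : List Int) : Nat :=
  match nums with
  | [] => 0
  | k :: t => if k ≤ num then bFindIdx num t + 1 else 0

-- one iteration of Source B's for loop (the body, as a named helper)
def bStep (st : List Int × List String) (name : String) : List Int × List String :=
  if PySem.Str.startswith name "IMG_" then
    match bParse name with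
    | some num =>
      let i := bFindIdx num st.1
      (PySem.List.insert st.1 (i : Int) num, PySem.List.insert st.2 (i : Int) name)
    | none => st
  else st

def get_sorted_video_files_alt (video_files : List String) : List String :=
  let st := video_files.foldl bStep ([], [])
  st.2

-- ===== PRECONDITION & SPEC =====
def Spec_get_sorted_video_files (video_files : List String) (out : List String) : Prop := out = get_sorted_video_files_alt video_files
instance (video_files : List String) (out : List String) : Decidable (Spec_get_sorted_video_files video_files out) := by unfold Spec_get_sorted_video_files; infer_instance

-- ===== CLAIM (what is proved, stated in full; the proofs are below) =====
def Claim_equal_get_sorted_video_files : Prop := ∀ (video_files : List String), Dom_get_sorted_video_files video_files → Spec_get_sorted_video_files video_files (get_sorted_video_files video_files)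

-- ===== LEMMAS AND PROOFS =====

-- the (number, name) pairs both programs effectively process, in input order
def imgPair (name : String) : Option (Int × String) :=
  if PySem.Str.startswith name "IMG_" then (aParse name).map (fun num => (num, name)) else none

def pairsOf (video_files : List String) : List (Int × String) :=
  video_files.filterMap imgPair

-- the decoration is consistent: each pair's fst is the A-key of its snd
lemma pairs_key (video_files : List String) :
    ∀ q ∈ pairsOf video_files, (aParse q.2).getD 0 = q.1 := by
  intro q hq
  rcases List.mem_filterMap.1 hq with ⟨name, _, h⟩
  unfold imgPair at h
  split at h
  · rcases Option.map_eq_some_iff.1 h with ⟨num, hnum, hpair⟩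
    subst hpair; simp [hnum]
  · exact absurd h (by simp)

lemma bFindIdx_le (num : Int) (nums : List Int) : bFindIdx num nums ≤ nums.length := by
  induction nums with
  | nil => simp [bFindIdx]
  | cons k t ih =>
      simp only [bFindIdx, List.length_cons]
      split
      · omega
      · omega

-- parallel insertion at bFindIdx = stable insertBy on the pair list, projected to fst
lemma ins_fst (num : Int) (name : String) (l : List (Int × String)) :
    (PySem.List.insertBy (fun a b => decide (a.1 < b.1)) (num, name) l).map Prod.fst
      = (l.map Prod.fst).take (bFindIdx num (l.map Prod.fst))
        ++ num :: (l.map Prod.fst).drop (bFindIdx num (l.map Prod.fst)) := by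
  induction l with
  | nil => simp [PySem.List.insertBy, bFindIdx]
  | cons q t ih =>
      by_cases h : q.1 ≤ num
      · have hb : decide ((num, name).1 < q.1) = false := by simp; omega
        simp only [PySem.List.insertBy, hb, Bool.false_eq_true, if_false, List.map_cons,
          bFindIdx, if_pos h, List.take_succ_cons, List.drop_succ_cons, List.cons_append]
        rw [ih]
      · have hb : decide ((num, name).1 < q.1) = true := by simp; omega
        simp only [PySem.List.insertBy, hb, if_true, List.map_cons, bFindIdx, if_neg h,
          List.take_zero, List.drop_zero, List.nil_append]

-- and projected to snd
lemma ins_snd (num : Int) (name : String) (l : List (Int × String)) :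
    (PySem.List.insertBy (fun a b => decide (a.1 < b.1)) (num, name) l).map Prod.snd
      = (l.map Prod.snd).take (bFindIdx num (l.map Prod.fst))
        ++ name :: (l.map Prod.snd).drop (bFindIdx num (l.map Prod.fst)) := by
  induction l with
  | nil => simp [PySem.List.insertBy, bFindIdx]
  | cons q t ih =>
      by_cases h : q.1 ≤ num
      · have hb : decide ((num, name).1 < q.1) = false := by simp; omega
        simp only [PySem.List.insertBy, hb, Bool.false_eq_true, if_false, List.map_cons,
          bFindIdx, if_pos h, List.take_succ_cons, List.drop_succ_cons, List.cons_append]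
        rw [ih]
      · have hb : decide ((num, name).1 < q.1) = true := by simp; omega
        simp only [PySem.List.insertBy, hb, if_true, List.map_cons, bFindIdx, if_neg h,
          List.take_zero, List.drop_zero, List.nil_append]

-- one loop iteration of B, phrased through the pair view
lemma bStep_eq (l : List (Int × String)) (x : String) :
    bStep (l.map Prod.fst, l.map Prod.snd) x
      = (match imgPair x with
         | some p => ((PySem.List.insertBy (fun a b => decide (a.1 < b.1)) p l).map Prod.fst,
                      (PySem.List.insertBy (fun a b => decide (a.1 < b.1)) p l).map Prod.snd)
         | none => (l.map Prod.fst, l.map Prod.snd)) := by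
  unfold bStep imgPair
  have hparse : bParse x = aParse x := rfl
  by_cases hs : PySem.Str.startswith x "IMG_"
  · rw [if_pos hs, if_pos hs, hparse]
    cases hp : aParse x with
    | none => simp
    | some num =>
        simp only [Option.map_some]
        have hle1 := bFindIdx_le num (l.map Prod.fst)
        have hle2 : bFindIdx num (l.map Prod.fst) ≤ (l.map Prod.snd).length := by simpa using hle1
        rw [ins_fst, ins_snd, PySem.List.insert_natCast _ _ _ hle1,
          PySem.List.insert_natCast _ _ _ hle2]
  · rw [if_neg hs, if_neg hs]

-- B's fold state is always the pair of projections of the insertBy fold over the pair list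
lemma alt_fold (video_files : List String) : ∀ P : List (Int × String),
    video_files.foldl bStep (P.map Prod.fst, P.map Prod.snd)
    = (((pairsOf video_files).foldl
          (fun a x => PySem.List.insertBy (fun u v => decide (u.1 < v.1)) x a) P).map Prod.fst,
       ((pairsOf video_files).foldl
          (fun a x => PySem.List.insertBy (fun u v => decide (u.1 < v.1)) x a) P).map Prod.snd) := by
  induction video_files with
  | nil => intro P; simp [pairsOf]
  | cons x t ih =>
      intro P
      simp only [List.foldl_cons, pairsOf, List.filterMap_cons]
      rw [bStep_eq]
      cases imgPair x with
      | none => exact ih P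
      | some p => exact ih _

-- ===== A-side: A's loop + sorted equals the snd-projection of the same insertBy fold =====

-- undecorating commutes with one stable insertion step, when keys are consistent
lemma map_snd_insertBy (key : String → Int) (p : Int × String) (acc : List (Int × String))
    (hp : key p.2 = p.1) (hacc : ∀ q ∈ acc, key q.2 = q.1) :
    (PySem.List.insertBy (fun a b => decide (a.1 < b.1)) p acc).map Prod.snd
      = PySem.List.insertBy (fun a b => decide (key a < key b)) p.2 (acc.map Prod.snd) := by
  induction acc with
  | nil => simp [PySem.List.insertBy]
  | cons q t ih =>
      have hq := hacc q (by simp)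
      have ht : ∀ r ∈ t, key r.2 = r.1 := fun r hr => hacc r (by simp [hr])
      simp only [PySem.List.insertBy, List.map_cons, hp, hq]
      split
      · simp
      · simpa using congrArg (q.2 :: ·) (ih ht)

-- undecorating commutes with the whole stable sort (as a foldl of insertBy)
lemma map_snd_sort (key : String → Int) (pairs : List (Int × String))
    (hpairs : ∀ q ∈ pairs, key q.2 = q.1) :
    ∀ acc : List (Int × String), (∀ q ∈ acc, key q.2 = q.1) →
    (pairs.foldl (fun a x => PySem.List.insertBy (fun u v => decide (u.1 < v.1)) x a) acc).map Prod.snd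
      = (pairs.map Prod.snd).foldl (fun a x => PySem.List.insertBy (fun u v => decide (key u < key v)) x a) (acc.map Prod.snd) := by
  induction pairs with
  | nil => simp
  | cons p t ih =>
      intro acc hacc
      have hp := hpairs p (by simp)
      have ht : ∀ q ∈ t, key q.2 = q.1 := fun q hq => hpairs q (by simp [hq])
      have hacc' : ∀ q ∈ PySem.List.insertBy (fun u v => decide (u.1 < v.1)) p acc, key q.2 = q.1 := by
        intro q hq
        rcases (PySem.List.mem_insertBy _ _ _ _).1 hq with h | h
        · subst h; exact hp
        · exact hacc q h
      simp only [List.foldl_cons, List.map_cons]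
      rw [ih ht _ hacc', map_snd_insertBy key p acc hp hacc]

-- one step of A's filtering loop, phrased through the pair view
lemma cons_step (acc : List String) (x : String) :
    (if PySem.Str.startswith x "IMG_" then
      match aParse x with
      | some _ => acc ++ [x]
      | none => acc
    else acc)
    = acc ++ (match imgPair x with | some p => [p.2] | none => []) := by
  unfold imgPair
  cases PySem.Str.startswith x "IMG_" <;> cases aParse x <;> simp

-- A's accumulation loop produces exactly the undecorated pair list
lemma valid_eq_map_snd (video_files : List String) : ∀ acc : List String,
    video_files.foldl (fun acc file_name =>
      if PySem.Str.startswith file_name "IMG_" then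
        match aParse file_name with
        | some _ => acc ++ [file_name]
        | none => acc
      else acc) acc
      = acc ++ (pairsOf video_files).map Prod.snd := by
  induction video_files with
  | nil => simp [pairsOf]
  | cons x t ih =>
      intro acc
      simp only [List.foldl_cons, pairsOf, List.filterMap_cons]
      rw [cons_step, ih]
      cases imgPair x <;> simp [pairsOf]

theorem equal_core (video_files : List String) :
    get_sorted_video_files video_files = get_sorted_video_files_alt video_files := by
  unfold get_sorted_video_files get_sorted_video_files_alt
  rw [valid_eq_map_snd _ []]
  rw [PySem.List.sorted_eq_foldl_insertBy]
  have hA := map_snd_sort (fun x => (aParse x).getD 0) (pairsOf video_files)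
    (pairs_key video_files) [] (by simp)
  have hB := alt_fold video_files []
  simp only [List.map_nil] at hA hB
  show _ = (List.foldl bStep ([], []) video_files).2
  rw [List.nil_append, hB, ← hA]

-- ===== VERDICT (by name: the statement is the Claim_ definition above) =====
theorem get_sorted_video_files_spec : Claim_equal_get_sorted_video_files := by
  intro video_files _
  unfold Spec_get_sorted_video_files
  exact equal_core video_files
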